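-- pv_equiv track=rewrite | github.com/soyukke/lean-unsolved | scripts/confluence_mp_distribution_inverse_tree.py | inverse_syracuse_all
-- ===== SOURCE A (Python) =====
-- def inverse_syracuse_all(m, N_max):
--     """Find all preimages n such that T(n)=m, n <= N_max, n odd"""
--     preimages = []
--     # n = (m * 2^j - 1) / 3, j=1,2,...
--     for j in range(1, 60):
--         num = m * (1 << j) - 1
--         if num % 3 == 0:
--             n = num // 3
--             if n > 0 and n % 2 == 1 and n <= N_max:
--                 preimages.append(n)
--             if n > N_max:
--                 break
--     return preimages
-- ===== SOURCE B (Python) =====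
-- def inverse_syracuse_all(m, N_max):
--     """Find all preimages n such that T(n)=m, n <= N_max, n odd"""
--     r = m % 3
--     if r == 0:
--         return []
--     # first exponent j with m * 2^j == 1 (mod 3); every candidate is automatically odd
--     j = 2 if r == 1 else 1
--     n = (m * (1 << j) - 1) // 3
--     preimages = []
--     while j < 60:
--         if 0 < n <= N_max:
--             preimages.append(n)
--         if n > N_max:
--             break
--         n = 4 * n + 1
--         j += 2
--     return preimages
-- ===== Notes on version B (the rewrite author's own statement) =====
-- stated objective: alternative
-- what changed: Instead of scanning all exponents j=1..59 and testing m*2^j-1 for divisibility by 3 (and n for oddness) at each step, B determines the unique valid starting exponent from m%3 (none if m%3==0), computes the first preimage directly, and generates the rest by the recurrence n -> 4n+1 with the same j<60 cap; the divisibility and oddness tests disappear.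
import Mathlib
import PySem

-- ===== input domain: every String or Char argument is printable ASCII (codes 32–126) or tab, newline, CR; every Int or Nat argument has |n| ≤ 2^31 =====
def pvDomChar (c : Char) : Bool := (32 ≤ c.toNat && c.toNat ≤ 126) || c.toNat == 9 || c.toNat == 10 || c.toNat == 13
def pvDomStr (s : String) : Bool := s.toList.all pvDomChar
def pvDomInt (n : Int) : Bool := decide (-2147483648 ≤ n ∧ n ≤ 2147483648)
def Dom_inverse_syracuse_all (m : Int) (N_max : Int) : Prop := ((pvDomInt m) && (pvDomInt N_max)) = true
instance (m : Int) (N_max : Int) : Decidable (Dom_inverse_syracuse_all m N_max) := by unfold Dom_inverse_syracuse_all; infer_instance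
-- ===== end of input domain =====

-- B replaces A's scan over all exponents j=1..59 (testing divisibility by 3 and oddness each time)
-- by the closed-form first exponent from m % 3 and the recurrence n -> 4n+1; same return value.

-- ===== PORT A =====
-- 'for j in range(1, 60)' as a counter recursion; '1 << j' is 2^j (exact, j ≥ 0); 'break' returns the accumulator.
def pvALoop (m : Int) (N_max : Int) (j : Nat) (acc : List Int) : List Int :=
  if h : j < 60 then
    let num := m * 2 ^ j - 1
    if PySem.Int.mod num 3 = 0 then
      let n := PySem.Int.floordiv num 3
      let acc' := if 0 < n ∧ PySem.Int.mod n 2 = 1 ∧ n ≤ N_max then acc ++ [n] else acc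
      if N_max < n then acc' else pvALoop m N_max (j + 1) acc'
    else pvALoop m N_max (j + 1) acc
  else acc
termination_by 60 - j

def inverse_syracuse_all (m : Int) (N_max : Int) : List Int :=
  pvALoop m N_max 1 []

-- ===== PORT B =====
-- 'while j < 60' as a counter recursion on j (stride 2); 'break' returns the accumulator.
def pvBLoop (N_max : Int) (n : Int) (j : Nat) (acc : List Int) : List Int :=
  if h : j < 60 then
    let acc' := if 0 < n ∧ n ≤ N_max then acc ++ [n] else acc
    if N_max < n then acc' else pvBLoop N_max (4 * n + 1) (j + 2) acc'
  else acc
termination_by 60 - j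

def inverse_syracuse_all_alt (m : Int) (N_max : Int) : List Int :=
  let r := PySem.Int.mod m 3
  if r = 0 then []
  else
    let j : Nat := if r = 1 then 2 else 1
    let n := PySem.Int.floordiv (m * 2 ^ j - 1) 3
    pvBLoop N_max n j []

-- ===== PRECONDITION & SPEC =====
def Spec_inverse_syracuse_all (m : Int) (N_max : Int) (out : List Int) : Prop := out = inverse_syracuse_all_alt m N_max
instance (m : Int) (N_max : Int) (out : List Int) : Decidable (Spec_inverse_syracuse_all m N_max out) := by unfold Spec_inverse_syracuse_all; infer_instance

-- ===== CLAIM (what is proved, stated in full; the proofs are below) =====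
def Claim_equal_inverse_syracuse_all : Prop := ∀ (m : Int) (N_max : Int), Dom_inverse_syracuse_all m N_max → Spec_inverse_syracuse_all m N_max (inverse_syracuse_all m N_max)

-- ===== LEMMAS AND PROOFS =====

-- If 3 | m, no num = m*2^j - 1 is divisible by 3, so A's loop never touches the accumulator.
lemma pvALoop_dead (m N_max : Int) (hm : PySem.Int.mod m 3 = 0) :
    ∀ (k j : Nat) (acc : List Int), 60 - j ≤ k → pvALoop m N_max j acc = acc := by
  intro k
  induction k with
  | zero =>
    intro j acc hk
    rw [pvALoop, dif_neg (by omega)]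
  | succ k ih =>
    intro j acc hk
    rw [pvALoop]
    split
    · have hdvd : (3 : Int) ∣ m := (PySem.Int.mod_eq_zero_iff_dvd m 3).mp hm
      have hdvd2 : (3 : Int) ∣ m * 2 ^ j := hdvd.mul_right _
      have hne : PySem.Int.mod (m * 2 ^ j - 1) 3 ≠ 0 := by
        rw [PySem.Int.mod_eq_emod_of_pos (by norm_num)]
        omega
      simp only [hne, if_false]
      exact ih (j + 1) acc (by omega)
    · rfl

-- Main lemma: once j has the valid parity (3 | m*2^j - 1), A's remaining scan equals B's
-- stride-2 recurrence loop started at n = (m*2^j - 1)//3.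
lemma pvLoop_eq (m N_max : Int) :
    ∀ (k j : Nat) (acc : List Int), 60 - j ≤ k → 1 ≤ j →
      PySem.Int.mod (m * 2 ^ j - 1) 3 = 0 →
      pvALoop m N_max j acc = pvBLoop N_max (PySem.Int.floordiv (m * 2 ^ j - 1) 3) j acc := by
  intro k
  induction k with
  | zero =>
    intro j acc hk hj hmod
    rw [pvALoop, pvBLoop, dif_neg (by omega), dif_neg (by omega)]
  | succ k ih =>
    intro j acc hk hj hmod
    have hdvd : (3 : Int) ∣ m * 2 ^ j - 1 := (PySem.Int.mod_eq_zero_iff_dvd _ 3).mp hmod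
    have h3n : PySem.Int.floordiv (m * 2 ^ j - 1) 3 * 3 + 0 = m * 2 ^ j - 1 := by
      have := PySem.Int.floordiv_mul_add_mod (m * 2 ^ j - 1) 3
      rw [hmod] at this; exact this
    have h2t : (2 : Int) ∣ m * 2 ^ j :=
      Dvd.dvd.mul_left (dvd_pow_self 2 (by omega)) m
    have hodd : PySem.Int.mod (PySem.Int.floordiv (m * 2 ^ j - 1) 3) 2 = 1 := by
      rw [PySem.Int.mod_eq_emod_of_pos (by norm_num)]
      omega
    by_cases h60 : j < 60
    · rw [pvALoop, pvBLoop, dif_pos h60, dif_pos h60]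
      have hiff : (0 < PySem.Int.floordiv (m * 2 ^ j - 1) 3 ∧
            PySem.Int.mod (PySem.Int.floordiv (m * 2 ^ j - 1) 3) 2 = 1 ∧
            PySem.Int.floordiv (m * 2 ^ j - 1) 3 ≤ N_max) ↔
          (0 < PySem.Int.floordiv (m * 2 ^ j - 1) 3 ∧
            PySem.Int.floordiv (m * 2 ^ j - 1) 3 ≤ N_max) := by
        rw [hodd]; tauto
      simp only [hmod, reduceIte, hiff]
      split
      · rfl
      · -- continue: A skips j+1 (wrong residue mod 3), then both recurse at j+2
        have hpow1 : m * 2 ^ (j + 1) = 2 * (m * 2 ^ j) := by ring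
        have hpow2 : m * 2 ^ (j + 2) = 4 * (m * 2 ^ j) := by ring
        have hskip : PySem.Int.mod (m * 2 ^ (j + 1) - 1) 3 ≠ 0 := by
          rw [hpow1, PySem.Int.mod_eq_emod_of_pos (by norm_num)]
          omega
        have hmod2 : PySem.Int.mod (m * 2 ^ (j + 2) - 1) 3 = 0 := by
          rw [hpow2, PySem.Int.mod_eq_zero_iff_dvd]
          omega
        have hn2 : PySem.Int.floordiv (m * 2 ^ (j + 2) - 1) 3 =
            4 * PySem.Int.floordiv (m * 2 ^ j - 1) 3 + 1 := by
          have h4 := PySem.Int.floordiv_mul_add_mod (m * 2 ^ (j + 2) - 1) 3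
          rw [hmod2] at h4
          rw [hpow2] at h4 ⊢
          omega
        rw [pvALoop]
        by_cases h61 : j + 1 < 60
        · rw [dif_pos h61]
          simp only [hskip, if_false]
          have := ih (j + 2)
            (if 0 < PySem.Int.floordiv (m * 2 ^ j - 1) 3 ∧
                PySem.Int.floordiv (m * 2 ^ j - 1) 3 ≤ N_max then
              acc ++ [PySem.Int.floordiv (m * 2 ^ j - 1) 3] else acc)
            (by omega) (by omega) hmod2
          rw [hn2] at this
          exact this
        · rw [dif_neg h61, pvBLoop, dif_neg (by omega)]
    · rw [pvALoop, pvBLoop, dif_neg h60, dif_neg h60]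

-- ===== VERDICT (by name: the statement is the Claim_ definition above) =====
theorem inverse_syracuse_all_spec : Claim_equal_inverse_syracuse_all := by
  intro m N_max _
  unfold Spec_inverse_syracuse_all inverse_syracuse_all inverse_syracuse_all_alt
  have hm : PySem.Int.mod m 3 = m % 3 := PySem.Int.mod_eq_emod_of_pos (by norm_num)
  have hrange : m % 3 = 0 ∨ m % 3 = 1 ∨ m % 3 = 2 := by omega
  rcases hrange with h | h | h
  · have h0 : PySem.Int.mod m 3 = 0 := by rw [hm]; exact h
    simp only [h0, reduceIte]
    exact pvALoop_dead m N_max h0 60 1 [] (by norm_num)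
  · -- m % 3 = 1: A skips j = 1, first valid exponent is j = 2
    have h1 : PySem.Int.mod m 3 = 1 := by rw [hm]; exact h
    simp only [h1, reduceIte]
    have hskip : PySem.Int.mod (m * 2 ^ 1 - 1) 3 ≠ 0 := by
      rw [PySem.Int.mod_eq_emod_of_pos (by norm_num)]
      omega
    have hmod2 : PySem.Int.mod (m * 2 ^ 2 - 1) 3 = 0 := by
      rw [PySem.Int.mod_eq_zero_iff_dvd]
      omega
    rw [pvALoop, dif_pos (by norm_num)]
    simp only [hskip, if_false]
    exact pvLoop_eq m N_max 60 2 [] (by norm_num) (by norm_num) hmod2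
  · -- m % 3 = 2: first valid exponent is j = 1
    have h2 : PySem.Int.mod m 3 = 2 := by rw [hm]; exact h
    simp only [h2]
    have hmod1 : PySem.Int.mod (m * 2 ^ 1 - 1) 3 = 0 := by
      rw [PySem.Int.mod_eq_zero_iff_dvd]
      omega
    exact pvLoop_eq m N_max 60 1 [] (by norm_num) (by norm_num) hmod1
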